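-- pv_equiv track=rewrite | github.com/Niivas/Problem-Solving | machines required/getMinMachines.py | getMinMachines
-- ===== SOURCE A (Python) =====
-- def getMinMachines(start, end):
--     intervals = list(zip(start, end))
--     map_ = {}  # 1:9, 2:14, 3:7
--
--     for pair in intervals:
--         s, e = pair[0], pair[1]
--         found = False
--         for m in map_:
--             if map_[m] < s:
--                 map_[m] = e
--                 found = True
--                 break
--         if not found:
--             map_[len(map_) + 1] = e
--     return len(map_)
-- ===== SOURCE B (Python) =====
-- # Persistent min-segment-tree over machine end-times: query the leftmost
-- # machine whose end < s in O(log n) instead of A's linear dict scan.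
-- INF = 1 << 62
--
-- def _build(k):
--     if k == 0:
--         return (INF, None, None)
--     sub = _build(k - 1)          # immutable: halves are shared
--     return (INF, sub, sub)
--
-- def _update(t, k, i, v):
--     if k == 0:
--         return (v, None, None)
--     _, l, r = t
--     half = 1 << (k - 1)
--     if i < half:
--         l = _update(l, k - 1, i, v)
--     else:
--         r = _update(r, k - 1, i - half, v)
--     return (min(l[0], r[0]), l, r)
--
-- def _leftmost(t, k, s):
--     # leftmost leaf index with value < s; requires t[0] < s
--     if k == 0:
--         return 0
--     _, l, r = t
--     if l[0] < s:
--         return _leftmost(l, k - 1, s)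
--     return (1 << (k - 1)) + _leftmost(r, k - 1, s)
--
-- def getMinMachines(start, end):
--     intervals = list(zip(start, end))
--     n = len(intervals)
--     if n == 0:
--         return 0
--     k = 0
--     while (1 << k) < n:
--         k += 1
--     t = _build(k)
--     cnt = 0
--     for s, e in intervals:
--         if t[0] < s:
--             t = _update(t, k, _leftmost(t, k, s), e)
--         else:
--             t = _update(t, k, cnt, e)
--             cnt += 1
--     return cnt
-- ===== Notes on version B (the rewrite author's own statement) =====
-- stated objective: faster
-- what changed: A scans all machines linearly inside the dict for the first one with end < s; B keeps machine end-times in a persistent min-segment tree and finds the leftmost free machine by an O(log n) descent, with an O(log n) point update.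
import Mathlib
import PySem

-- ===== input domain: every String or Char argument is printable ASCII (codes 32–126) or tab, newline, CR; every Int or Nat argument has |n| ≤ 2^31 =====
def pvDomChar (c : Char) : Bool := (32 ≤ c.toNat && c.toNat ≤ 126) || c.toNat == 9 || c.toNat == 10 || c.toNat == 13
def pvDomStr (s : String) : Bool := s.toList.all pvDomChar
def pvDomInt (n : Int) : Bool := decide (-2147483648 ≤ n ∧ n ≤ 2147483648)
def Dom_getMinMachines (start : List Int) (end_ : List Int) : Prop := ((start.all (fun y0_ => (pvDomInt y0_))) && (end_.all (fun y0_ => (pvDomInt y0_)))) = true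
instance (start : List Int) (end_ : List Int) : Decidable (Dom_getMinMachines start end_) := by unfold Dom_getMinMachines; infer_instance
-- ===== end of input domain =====

-- B replaces A's linear first-free-machine scan inside the dict by a persistent
-- min-segment tree over machine end-times (leftmost slot with end < s by an O(log n) descent).

-- ===== PORT A =====
-- 'for m in map_: if map_[m] < s: map_[m] = e; found = True; break' — iterate a
-- snapshot of the dict's items; map_[m] is always a present key, so getD is exact here.
def pvInnerA (s e : Int) : List (Int × Int) → PySem.Dict Int Int → PySem.Dict Int Int × Bool
  | [], d => (d, false)
  | (m, _) :: rest, d =>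
    if d.getD m 0 < s then (d.insert m e, true)
    else pvInnerA s e rest d

def getMinMachines (start : List Int) (end_ : List Int) : Int :=
  let intervals := start.zip end_
  let final := intervals.foldl (fun d p =>
    let r := pvInnerA p.1 p.2 d.items d
    if r.2 then r.1 else r.1.insert ((r.1.size : Int) + 1) p.2) PySem.Dict.empty
  (final.size : Int)

-- ===== PORT B =====
-- persistent min-segment tree over 2^k machine slots (value = end-time, pvINF = unused slot)
inductive MTree where
  | leaf : Int → MTree
  | node : Int → MTree → MTree → MTree
deriving Repr, DecidableEq

def pvINF : Int := 2 ^ 62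

def pvMval : MTree → Int
  | .leaf v => v
  | .node m _ _ => m

def pvBuild : Nat → MTree
  | 0 => .leaf pvINF
  | k + 1 => let sub := pvBuild k; .node pvINF sub sub

def pvUpdate : Nat → MTree → Int → Int → MTree
  | 0, _, _, v => .leaf v
  | _ + 1, .leaf w, _, _ => .leaf w        -- unreachable: a depth-(k+1) tree is a node
  | k + 1, .node _ l r, i, v =>
    if i < (2 : Int) ^ k then
      let l' := pvUpdate k l i v
      .node (min (pvMval l') (pvMval r)) l' r
    else
      let r' := pvUpdate k r (i - (2 : Int) ^ k) v
      .node (min (pvMval l) (pvMval r')) l r'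

-- leftmost leaf index with value < s (caller guarantees pvMval t < s)
def pvLeftmost : Nat → MTree → Int → Int
  | 0, _, _ => 0
  | _ + 1, .leaf _, _ => 0                 -- unreachable
  | k + 1, .node _ l r, s =>
    if pvMval l < s then pvLeftmost k l s
    else (2 : Int) ^ k + pvLeftmost k r s

-- 'k = 0; while (1 << k) < n: k += 1'
def pvChooseK (n k : Nat) : Nat :=
  if 2 ^ k < n then pvChooseK n (k + 1) else k
termination_by n - k
decreasing_by
  have := Nat.lt_two_pow_self (n := k)
  omega

def getMinMachines_alt (start : List Int) (end_ : List Int) : Int :=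
  let intervals := start.zip end_
  let n := intervals.length
  if n = 0 then 0
  else
    let k := pvChooseK n 0
    let res := intervals.foldl (fun (p : MTree × Int) sv =>
      if pvMval p.1 < sv.1 then (pvUpdate k p.1 (pvLeftmost k p.1 sv.1) sv.2, p.2)
      else (pvUpdate k p.1 p.2 sv.2, p.2 + 1)) (pvBuild k, 0)
    res.2

-- ===== PRECONDITION & SPEC =====
def Spec_getMinMachines (start : List Int) (end_ : List Int) (out : Int) : Prop := out = getMinMachines_alt start end_
instance (start : List Int) (end_ : List Int) (out : Int) : Decidable (Spec_getMinMachines start end_ out) := by unfold Spec_getMinMachines; infer_instance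

-- ===== CLAIM (what is proved, stated in full; the proofs are below) =====
def Claim_equal_getMinMachines : Prop := ∀ (start : List Int) (end_ : List Int), Dom_getMinMachines start end_ → Spec_getMinMachines start end_ (getMinMachines start end_)

-- ===== LEMMAS AND PROOFS =====

-- abstract model shared by both proofs: the list of machine end-times;
-- each interval either overwrites the first end < s or appends a new machine
def stepE (ends : List Int) (s e : Int) : List Int :=
  match ends.findIdx? (fun x => x < s) with
  | some j => ends.set j e
  | none => ends ++ [e]

def foldE (intervals : List (Int × Int)) (ends : List Int) : List Int :=
  intervals.foldl (fun es p => stepE es p.1 p.2) ends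

theorem length_stepE (ends : List Int) (s e : Int) :
    (stepE ends s e).length = ends.length ∨ (stepE ends s e).length = ends.length + 1 := by
  unfold stepE
  rcases ends.findIdx? (fun x => x < s) with _ | j <;> simp

-- ---- A-side: the dict with machine ends [e0, …, e(n-1)] has items [(1,e0), …, (n,e(n-1))] ----
def repA : List Int → Nat → List (Int × Int)
  | [], _ => []
  | v :: vs, i => (((i : Int) + 1), v) :: repA vs (i + 1)

theorem length_repA (ends : List Int) (i : Nat) : (repA ends i).length = ends.length := by
  induction ends generalizing i with
  | nil => rfl
  | cons v vs ih => simp [repA, ih]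

theorem keys_repA_bound (ends : List Int) (i : Nat) :
    ∀ p ∈ repA ends i, (i : Int) + 1 ≤ p.1 ∧ p.1 ≤ (i : Int) + ends.length := by
  induction ends generalizing i with
  | nil => simp [repA]
  | cons v vs ih =>
    intro p hp
    simp only [repA, List.mem_cons] at hp
    rcases hp with rfl | hp
    · refine ⟨le_refl _, ?_⟩
      simp only [List.length_cons]
      push_cast
      omega
    · obtain ⟨h1, h2⟩ := ih (i + 1) p hp
      push_cast at h1 h2
      refine ⟨by omega, ?_⟩
      simp only [List.length_cons]
      push_cast
      omega

theorem nodup_keys_repA (ends : List Int) (i : Nat) :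
    ((repA ends i).map Prod.fst).Nodup := by
  induction ends generalizing i with
  | nil => simp [repA]
  | cons v vs ih =>
    simp only [repA, List.map_cons, List.nodup_cons]
    refine ⟨?_, ih (i + 1)⟩
    intro hmem
    rcases List.mem_map.mp hmem with ⟨p, hp, hk⟩
    have := keys_repA_bound vs (i + 1) p hp
    rw [hk] at this
    push_cast at this
    omega

theorem mem_repA (ends : List Int) (i j : Nat) (h : j < ends.length) :
    (((i + j : Nat) : Int) + 1, ends[j]) ∈ repA ends i := by
  induction ends generalizing i j with
  | nil => simp at h
  | cons v vs ih =>
    cases j with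
    | zero => simp [repA]
    | succ j' =>
      simp only [repA, List.mem_cons]
      right
      have := ih (i + 1) j' (by simpa using h)
      have harith : ((i + (j' + 1) : Nat) : Int) = (((i + 1) + j' : Nat) : Int) := by push_cast; ring
      rw [harith]
      simpa using this

theorem repA_map_id (ends : List Int) (i : Nat) (K e : Int)
    (hK : K ≤ (i : Int) ∨ ((i : Int) + ends.length) < K) :
    (repA ends i).map (fun p => if p.1 == K then (K, e) else p) = repA ends i := by
  have : ∀ p ∈ repA ends i, (fun p : Int × Int => if p.1 == K then (K, e) else p) p = id p := by
    intro p hp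
    have := keys_repA_bound ends i p hp
    have hne : ¬ (p.1 == K) := by simp only [beq_iff_eq]; rcases hK with hK | hK <;> omega
    simp [hne]
  rw [List.map_congr_left this, List.map_id]

theorem repA_set (ends : List Int) (i j : Nat) (e : Int) (h : j < ends.length) :
    (repA ends i).map (fun p => if p.1 == ((i + j : Nat) : Int) + 1 then ((((i + j : Nat) : Int) + 1), e) else p)
      = repA (ends.set j e) i := by
  induction ends generalizing i j with
  | nil => simp at h
  | cons v vs ih =>
    cases j with
    | zero =>
      simp only [repA, List.map_cons, List.set_cons_zero]
      have hhd : (((i : Int) + 1) == ((i + 0 : Nat) : Int) + 1) := by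
        simp only [beq_iff_eq]; push_cast; ring
      rw [if_pos hhd]
      have htl : (repA vs (i + 1)).map (fun p => if p.1 == ((i + 0 : Nat) : Int) + 1 then (((i + 0 : Nat) : Int) + 1, e) else p) = repA vs (i + 1) := by
        apply repA_map_id
        left
        push_cast
        omega
      rw [htl]
      simp
    | succ j' =>
      simp only [repA, List.map_cons, List.set_cons_succ]
      have hhd : ¬ (((i : Int) + 1) == ((i + (j' + 1) : Nat) : Int) + 1) := by
        simp only [beq_iff_eq]; push_cast; omega
      rw [if_neg hhd]
      have harith : ((i + (j' + 1) : Nat) : Int) = (((i + 1) + j' : Nat) : Int) := by push_cast; ring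
      rw [harith, ih (i + 1) j' (by simpa using h)]

theorem repA_append (ends : List Int) (i : Nat) (e : Int) :
    repA (ends ++ [e]) i = repA ends i ++ [(((i + ends.length : Nat) : Int) + 1, e)] := by
  induction ends generalizing i with
  | nil => simp [repA]
  | cons v vs ih =>
    simp only [List.cons_append, repA, ih (i + 1), List.length_cons]
    have : ((i + 1) + vs.length : Nat) = (i + (vs.length + 1) : Nat) := by omega
    rw [this]

-- the dict A has built after processing a prefix
def dA (ends : List Int) : PySem.Dict Int Int := PySem.Dict.mk (repA ends 0)

theorem dA_nodup_keys (ends : List Int) : (dA ends).keys.Nodup := by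
  simpa [dA, PySem.Dict.keys] using nodup_keys_repA ends 0

theorem dA_getD (ends : List Int) (j : Nat) (h : j < ends.length) :
    (dA ends).getD (((0 + j : Nat) : Int) + 1) 0 = ends[j] := by
  have hmem : ((((0 + j : Nat)) : Int) + 1, ends[j]) ∈ (dA ends).items := mem_repA ends 0 j h
  exact PySem.Dict.getD_of_mem_items (dA ends) hmem (dA_nodup_keys ends) 0

theorem dA_size (ends : List Int) : (dA ends).size = ends.length := by
  simp [dA, PySem.Dict.size, length_repA]

theorem pvInnerA_spec (s e : Int) (ends2 : List Int) (i : Nat) (d : PySem.Dict Int Int)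
    (hget : ∀ j, (h : j < ends2.length) → d.getD (((i + j : Nat) : Int) + 1) 0 = ends2[j]) :
    pvInnerA s e (repA ends2 i) d =
      match ends2.findIdx? (fun x => x < s) with
      | some j => (d.insert (((i + j : Nat) : Int) + 1) e, true)
      | none => (d, false) := by
  induction ends2 generalizing i with
  | nil => simp [repA, pvInnerA, List.findIdx?_nil]
  | cons v vs ih =>
    have h0 := hget 0 (by simp)
    simp only [List.getElem_cons_zero] at h0
    by_cases hv : v < s
    · have hlt : d.getD ((i : Int) + 1) 0 < s := by
        rw [show ((i : Int) + 1) = (((i + 0 : Nat) : Int) + 1) by push_cast; ring, h0]; exact hv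
      simp [repA, pvInnerA, hlt, List.findIdx?_cons, hv]
    · have hnlt : ¬ d.getD ((i : Int) + 1) 0 < s := by
        rw [show ((i : Int) + 1) = (((i + 0 : Nat) : Int) + 1) by push_cast; ring, h0]; exact hv
      have ihr := ih (i + 1) (by
        intro j hj
        have := hget (j + 1) (by simpa using hj)
        have harith : ((i + (j + 1) : Nat) : Int) = (((i + 1) + j : Nat) : Int) := by push_cast; ring
        rw [harith] at this
        simpa using this)
      simp only [repA, pvInnerA, hnlt, if_false, ihr, List.findIdx?_cons, decide_eq_true_eq, hv]
      rcases hfi : vs.findIdx? (fun x => x < s) with _ | j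
      · simp
      · simp only [Option.map_some]
        have harith : (((i + 1) + j : Nat) : Int) = ((i + (j + 1) : Nat) : Int) := by push_cast; ring
        rw [harith]

-- one outer step of A preserves the dict representation
theorem stepA_rep (ends : List Int) (s e : Int) :
    (if (pvInnerA s e (dA ends).items (dA ends)).2
     then (pvInnerA s e (dA ends).items (dA ends)).1
     else (pvInnerA s e (dA ends).items (dA ends)).1.insert
       (((pvInnerA s e (dA ends).items (dA ends)).1.size : Int) + 1) e) = dA (stepE ends s e) := by
  have hitems : (dA ends).items = repA ends 0 := rfl
  have hspec := pvInnerA_spec s e ends 0 (dA ends) (fun j hj => dA_getD ends j hj)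
  rw [hitems, hspec]
  clear hspec
  rcases hfi : ends.findIdx? (fun x => x < s) with _ | j
  · -- not found: fresh key ends.length + 1 is appended
    simp only [Bool.false_eq_true, if_false]
    have hnotc : (dA ends).contains (((dA ends).size : Int) + 1) = false := by
      rw [Bool.eq_false_iff]
      intro hc
      rw [PySem.Dict.contains_iff_mem_keys] at hc
      rcases List.mem_map.mp hc with ⟨p, hp, hk⟩
      have hb := keys_repA_bound ends 0 p hp
      rw [hk, dA_size] at hb
      push_cast at hb
      omega
    apply PySem.Dict.ext
    rw [PySem.Dict.items_insert_of_not_contains _ _ hnotc, dA_size]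
    simp only [stepE, hfi]
    have : (dA (ends ++ [e])).items = repA (ends ++ [e]) 0 := rfl
    rw [this, repA_append, hitems]
    norm_num
  · -- found at index j: in-place overwrite of key j+1
    simp only [if_true]
    have hj : j < ends.length := by
      rcases List.findIdx?_eq_some_iff_getElem.mp hfi with ⟨h, _, _⟩
      exact h
    have hc : (dA ends).contains (((0 + j : Nat) : Int) + 1) = true := by
      rw [PySem.Dict.contains_iff_mem_keys]
      exact List.mem_map.mpr ⟨_, mem_repA ends 0 j hj, rfl⟩
    apply PySem.Dict.ext
    rw [PySem.Dict.items_insert_of_contains _ _ hc]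
    simp only [stepE, hfi, dA]
    exact repA_set ends 0 j e hj

theorem foldA_rep (intervals : List (Int × Int)) (ends : List Int) :
    intervals.foldl (fun d p =>
      let r := pvInnerA p.1 p.2 d.items d
      if r.2 then r.1 else r.1.insert ((r.1.size : Int) + 1) p.2) (dA ends)
      = dA (foldE intervals ends) := by
  induction intervals generalizing ends with
  | nil => rfl
  | cons p rest ih =>
    simp only [List.foldl_cons, foldE] at ih ⊢
    rw [stepA_rep ends p.1 p.2]
    exact ih (stepE ends p.1 p.2)

-- ---- B-side: the segment tree represents the machine-end list padded with pvINF ----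
def toL : MTree → List Int
  | .leaf v => [v]
  | .node _ l r => toL l ++ toL r

def Sh : Nat → MTree → Prop
  | 0, .leaf _ => True
  | 0, .node _ _ _ => False
  | _ + 1, .leaf _ => False
  | k + 1, .node m l r => Sh k l ∧ Sh k r ∧ m = min (pvMval l) (pvMval r)

theorem length_toL (k : Nat) (t : MTree) (h : Sh k t) : (toL t).length = 2 ^ k := by
  induction k generalizing t with
  | zero => cases t with
    | leaf v => simp [toL]
    | node m l r => exact absurd h (by simp [Sh])
  | succ k ih => cases t with
    | leaf v => exact absurd h (by simp [Sh])
    | node m l r =>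
      obtain ⟨hl, hr, _⟩ := h
      simp [toL, ih l hl, ih r hr, pow_succ]
      ring

theorem mval_lt_iff (k : Nat) (t : MTree) (h : Sh k t) (s : Int) :
    pvMval t < s ↔ ∃ x ∈ toL t, x < s := by
  induction k generalizing t with
  | zero => cases t with
    | leaf v => simp [toL, pvMval]
    | node m l r => exact absurd h (by simp [Sh])
  | succ k ih => cases t with
    | leaf v => exact absurd h (by simp [Sh])
    | node m l r =>
      obtain ⟨hl, hr, hm⟩ := h
      rw [show pvMval (MTree.node m l r) = m from rfl,
        show toL (MTree.node m l r) = toL l ++ toL r from rfl,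
        hm, min_lt_iff, ih l hl, ih r hr]
      simp only [List.mem_append]
      constructor
      · rintro (⟨x, hx, hxs⟩ | ⟨x, hx, hxs⟩) <;> exact ⟨x, by tauto, hxs⟩
      · rintro ⟨x, hx | hx, hxs⟩
        · exact Or.inl ⟨x, hx, hxs⟩
        · exact Or.inr ⟨x, hx, hxs⟩

theorem toL_build (k : Nat) : toL (pvBuild k) = List.replicate (2 ^ k) pvINF := by
  induction k with
  | zero => simp [pvBuild, toL]
  | succ k ih =>
    simp [pvBuild, toL, ih, pow_succ, Nat.mul_two, ← List.replicate_append_replicate]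

theorem mval_build (k : Nat) : pvMval (pvBuild k) = pvINF := by
  cases k <;> rfl

theorem sh_build (k : Nat) : Sh k (pvBuild k) := by
  induction k with
  | zero => simp [pvBuild, Sh]
  | succ k ih => exact ⟨ih, ih, by rw [mval_build, min_self]⟩

theorem update_spec (k : Nat) (t : MTree) (i : Nat) (v : Int)
    (h : Sh k t) (hi : i < 2 ^ k) :
    toL (pvUpdate k t (i : Int) v) = (toL t).set i v ∧ Sh k (pvUpdate k t (i : Int) v) := by
  induction k generalizing t i with
  | zero => cases t with
    | leaf w =>
      interval_cases i
      simp [pvUpdate, toL, Sh]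
    | node m l r => exact absurd h (by simp [Sh])
  | succ k ih => cases t with
    | leaf w => exact absurd h (by simp [Sh])
    | node m l r =>
      obtain ⟨hl, hr, hm⟩ := h
      have hlen : (toL l).length = 2 ^ k := length_toL k l hl
      by_cases hlt : i < 2 ^ k
      · have hc : ((i : Nat) : Int) < (2 : Int) ^ k := by exact_mod_cast hlt
        obtain ⟨hset, hsh⟩ := ih l i hl hlt
        simp only [pvUpdate, hc, if_true, toL, hset]
        refine ⟨?_, hsh, hr, rfl⟩
        rw [List.set_append]
        simp [hlen, hlt]
      · have hc : ¬ (((i : Nat) : Int) < (2 : Int) ^ k) := by exact_mod_cast hlt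
        have hpow : 2 ^ (k + 1) = 2 ^ k + 2 ^ k := by rw [pow_succ]; ring
        have hi' : i - 2 ^ k < 2 ^ k := by omega
        obtain ⟨hset, hsh⟩ := ih r (i - 2 ^ k) hr hi'
        have hcast : ((i : Nat) : Int) - (2 : Int) ^ k = ((i - 2 ^ k : Nat) : Int) := by
          have h2 : 2 ^ k ≤ i := by omega
          push_cast [h2]
          ring
        simp only [pvUpdate, hc, if_false, toL, hcast, hset]
        refine ⟨?_, hl, hsh, rfl⟩
        rw [List.set_append]
        simp [hlen, hlt]

theorem leftmost_spec (k : Nat) (t : MTree) (s : Int) (j : Nat)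
    (h : Sh k t) (hj : (toL t).findIdx? (fun x => x < s) = some j) :
    pvLeftmost k t s = (j : Int) := by
  induction k generalizing t j with
  | zero => cases t with
    | leaf v =>
      simp only [toL, List.findIdx?_cons, List.findIdx?_nil, Option.map_none] at hj
      by_cases hv : v < s
      · simp only [hv, decide_true, if_true, Option.some.injEq] at hj
        simp [pvLeftmost, ← hj]
      · simp [hv] at hj
    | node m l r => exact absurd h (by simp [Sh])
  | succ k ih => cases t with
    | leaf v => exact absurd h (by simp [Sh])
    | node m l r =>
      obtain ⟨hl, hr, hm⟩ := h
      have hlen : (toL l).length = 2 ^ k := length_toL k l hl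
      rw [toL, List.findIdx?_append] at hj
      by_cases hlt : pvMval l < s
      · have : (toL l).findIdx? (fun x => x < s) ≠ none := by
          intro hnone
          rw [List.findIdx?_eq_none_iff] at hnone
          rcases (mval_lt_iff k l hl s).mp hlt with ⟨x, hx, hxs⟩
          have := hnone x hx
          simp [hxs] at this
        rcases hsome : (toL l).findIdx? (fun x => x < s) with _ | j₁
        · exact absurd hsome this
        · rw [hsome] at hj
          simp only [Option.some_or, Option.some.injEq] at hj
          subst hj
          simp only [pvLeftmost, hlt, if_true]
          exact ih l j₁ hl hsome
      · have hnone : (toL l).findIdx? (fun x => x < s) = none := by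
          rw [List.findIdx?_eq_none_iff]
          intro x hx
          simp only [decide_eq_false_iff_not]
          intro hxs
          exact hlt ((mval_lt_iff k l hl s).mpr ⟨x, hx, hxs⟩)
        rw [hnone] at hj
        simp only [Option.none_or] at hj
        rcases hsome : (toL r).findIdx? (fun x => x < s) with _ | j₂
        · rw [hsome] at hj; simp at hj
        · rw [hsome] at hj
          simp only [Option.map_some, Option.some.injEq] at hj
          subst hj
          simp only [pvLeftmost, hlt, if_false]
          rw [ih r j₂ hr hsome, hlen]
          push_cast
          ring

-- one B step matches one abstract step
theorem stepB_spec (k : Nat) (t : MTree) (ends : List Int) (s e : Int)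
    (hsh : Sh k t) (hrep : toL t = ends ++ List.replicate (2 ^ k - ends.length) pvINF)
    (hlen : ends.length < 2 ^ k) (hsb : s ≤ 2147483648) :
    (if pvMval t < s then (pvUpdate k t (pvLeftmost k t s) e, (ends.length : Int))
     else (pvUpdate k t ((ends.length : Nat) : Int) e, ((ends.length : Nat) : Int) + 1)).1 = pvUpdate k t (if pvMval t < s then pvLeftmost k t s else ((ends.length : Nat) : Int)) e
    ∧ Sh k (pvUpdate k t (if pvMval t < s then pvLeftmost k t s else ((ends.length : Nat) : Int)) e)
    ∧ toL (pvUpdate k t (if pvMval t < s then pvLeftmost k t s else ((ends.length : Nat) : Int)) e)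
        = stepE ends s e ++ List.replicate (2 ^ k - (stepE ends s e).length) pvINF
    ∧ (if pvMval t < s then ((ends.length : Nat) : Int) else ((ends.length : Nat) : Int) + 1)
        = ((stepE ends s e).length : Int) := by
  have hINF : ¬ (pvINF < s) := by
    unfold pvINF
    omega
  rcases hfi : ends.findIdx? (fun x => x < s) with _ | j
  · -- no machine free: new machine at slot ends.length
    have hnone : (toL t).findIdx? (fun x => x < s) = none := by
      rw [hrep, List.findIdx?_append, List.findIdx?_replicate]
      have : ¬ (0 < 2 ^ k - ends.length ∧ (decide (pvINF < s)) = true) := by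
        simp [hINF]
      rw [hfi, if_neg this]
      simp
    have hnlt : ¬ pvMval t < s := by
      intro hlt
      rcases (mval_lt_iff k t hsh s).mp hlt with ⟨x, hx, hxs⟩
      rw [List.findIdx?_eq_none_iff] at hnone
      have := hnone x hx
      simp [hxs] at this
    obtain ⟨hset, hsh'⟩ := update_spec k t ends.length e hsh hlen
    simp only [hnlt, if_false, stepE, hfi]
    refine ⟨trivial, hsh', ?_, by simp⟩
    rw [hset, hrep, List.set_append]
    simp only [if_neg (lt_irrefl ends.length), Nat.sub_self]
    have hrepl : 2 ^ k - ends.length = (2 ^ k - (ends.length + 1)) + 1 := by omega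
    rw [hrepl, List.replicate_succ, List.set_cons_zero]
    simp
  · -- machine j is free: overwrite slot j
    have hj : j < ends.length := by
      rcases List.findIdx?_eq_some_iff_getElem.mp hfi with ⟨h, _, _⟩
      exact h
    have hsome : (toL t).findIdx? (fun x => x < s) = some j := by
      rw [hrep, List.findIdx?_append, hfi]
      simp
    have hlt : pvMval t < s := by
      rw [mval_lt_iff k t hsh s]
      rcases List.findIdx?_eq_some_iff_getElem.mp hsome with ⟨hb, hp, _⟩
      exact ⟨(toL t)[j], List.getElem_mem hb, by simpa using hp⟩
    have hLM : pvLeftmost k t s = (j : Int) := leftmost_spec k t s j hsh hsome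
    obtain ⟨hset, hsh'⟩ := update_spec k t j e hsh (by omega)
    simp only [hlt, if_true, stepE, hfi, hLM]
    refine ⟨trivial, hsh', ?_, by simp [List.length_set]⟩
    rw [hset, hrep, List.set_append, if_pos hj]
    simp [List.length_set]

theorem foldB_spec (k : Nat) (intervals : List (Int × Int)) (t : MTree) (ends : List Int)
    (hsh : Sh k t) (hrep : toL t = ends ++ List.replicate (2 ^ k - ends.length) pvINF)
    (hfit : ends.length + intervals.length ≤ 2 ^ k)
    (hdom : ∀ p ∈ intervals, p.1 ≤ 2147483648) :
    (intervals.foldl (fun (p : MTree × Int) sv =>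
      if pvMval p.1 < sv.1 then (pvUpdate k p.1 (pvLeftmost k p.1 sv.1) sv.2, p.2)
      else (pvUpdate k p.1 p.2 sv.2, p.2 + 1)) (t, ((ends.length : Nat) : Int))).2
      = ((foldE intervals ends).length : Int) := by
  induction intervals generalizing t ends with
  | nil => simp [foldE]
  | cons p rest ih =>
    have hlen : ends.length < 2 ^ k := by
      simp only [List.length_cons] at hfit
      omega
    have hsb : p.1 ≤ 2147483648 := hdom p (List.mem_cons_self)
    obtain ⟨-, hsh', hrep', hcnt⟩ := stepB_spec k t ends p.1 p.2 hsh hrep hlen hsb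
    have hlen' : (stepE ends p.1 p.2).length + rest.length ≤ 2 ^ k := by
      rcases length_stepE ends p.1 p.2 with h | h <;>
        (rw [h]; simp only [List.length_cons] at hfit; omega)
    have ihr := ih (pvUpdate k t (if pvMval t < p.1 then pvLeftmost k t p.1 else ((ends.length : Nat) : Int)) p.2)
      (stepE ends p.1 p.2) hsh' hrep' hlen' (fun q hq => hdom q (List.mem_cons_of_mem _ hq))
    simp only [List.foldl_cons, foldE] at ihr ⊢
    rw [← ihr]
    by_cases hlt : pvMval t < p.1
    · simp only [hlt, if_true] at hcnt ⊢
      rw [hcnt]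
    · simp only [hlt, if_false] at hcnt ⊢
      rw [hcnt]

theorem chooseK_ge (n k : Nat) : n ≤ 2 ^ (pvChooseK n k) := by
  fun_induction pvChooseK n k with
  | case1 k h ih => exact ih
  | case2 k h => omega

-- ===== VERDICT (by name: the statement is the Claim_ definition above) =====
theorem getMinMachines_spec : Claim_equal_getMinMachines := by
  intro start end_ hdom
  unfold Spec_getMinMachines getMinMachines getMinMachines_alt
  simp only []
  set intervals := start.zip end_ with hintervals
  by_cases hn : intervals.length = 0
  · have : intervals = [] := List.length_eq_zero_iff.mp hn
    simp [this, PySem.Dict.size]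
  · rw [if_neg hn]
    have hdomS : ∀ p ∈ intervals, p.1 ≤ 2147483648 := by
      intro p hp
      have hmem : p.1 ∈ start := (List.of_mem_zip hp).1
      unfold Dom_getMinMachines at hdom
      rw [Bool.and_eq_true] at hdom
      have := List.all_eq_true.mp hdom.1 p.1 hmem
      unfold pvDomInt at this
      simp only [decide_eq_true_eq] at this
      omega
    set k := pvChooseK intervals.length 0 with hk
    have hfit : (([] : List Int)).length + intervals.length ≤ 2 ^ k := by
      simp only [List.length_nil, Nat.zero_add]
      exact chooseK_ge intervals.length 0
    have hB := foldB_spec k intervals (pvBuild k) [] (sh_build k)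
      (by simp [toL_build]) hfit hdomS
    simp only [List.length_nil, Nat.cast_zero] at hB
    have hA : (intervals.foldl (fun d p =>
        let r := pvInnerA p.1 p.2 d.items d
        if r.2 then r.1 else r.1.insert ((r.1.size : Int) + 1) p.2) PySem.Dict.empty)
        = dA (foldE intervals []) := foldA_rep intervals []
    rw [hA, hB, dA_size]
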